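-- pv_equiv track=rewrite | github.com/datakind/edvise | src/edvise/genai/identity_agent/term_normalization/utilities.py | _resolve_season_token
-- ===== SOURCE A (Python) =====
-- def _resolve_season_token(t_norm: str | None, norm_keys: list[str]) -> str | None:
--     """Map a normalized token to a season_map raw key (lowercase)."""
--     if t_norm is None:
--         return None
--     for key in norm_keys:
--         if t_norm == key:
--             return key
--     for key in norm_keys:
--         if t_norm.startswith(key):
--             return key
--     for key in norm_keys:
--         if t_norm.endswith(key):
--             return key
--     return None
-- ===== SOURCE B (Python) =====
-- def _resolve_season_token(t_norm, norm_keys):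
--     """Single pass: exact match returns immediately; first prefix and
--     first suffix candidates are accumulated and chosen in that order."""
--     if t_norm is None:
--         return None
--     first_prefix = None
--     first_suffix = None
--     for key in norm_keys:
--         if t_norm == key:
--             return key
--         if first_prefix is None and t_norm.startswith(key):
--             first_prefix = key
--         if first_suffix is None and t_norm.endswith(key):
--             first_suffix = key
--     if first_prefix is not None:
--         return first_prefix
--     return first_suffix
-- ===== Notes on version B (the rewrite author's own statement) =====
-- stated objective: alternative
-- what changed: Three sequential scans over norm_keys are replaced by one pass that returns on exact match and accumulates the first prefix and first suffix candidates.
import Mathlib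
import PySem

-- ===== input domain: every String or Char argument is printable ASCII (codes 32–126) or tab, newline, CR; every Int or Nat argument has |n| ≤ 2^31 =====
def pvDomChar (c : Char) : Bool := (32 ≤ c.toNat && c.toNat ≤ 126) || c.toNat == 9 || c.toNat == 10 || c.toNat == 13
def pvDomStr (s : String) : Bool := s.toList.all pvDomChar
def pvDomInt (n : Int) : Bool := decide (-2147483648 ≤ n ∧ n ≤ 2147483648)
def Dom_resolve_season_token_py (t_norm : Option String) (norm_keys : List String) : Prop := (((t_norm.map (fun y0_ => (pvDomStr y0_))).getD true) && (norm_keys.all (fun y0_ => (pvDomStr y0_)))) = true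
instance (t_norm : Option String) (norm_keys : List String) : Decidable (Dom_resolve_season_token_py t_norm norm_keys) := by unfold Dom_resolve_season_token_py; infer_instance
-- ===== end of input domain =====

-- B replaces A's three sequential scans with one pass accumulating the first prefix and first suffix candidates (alternative decomposition, same cost).
-- ===== PORT A =====
def aExact (t : String) : List String → Option String
  | [] => none
  | k :: ks => if t == k then some k else aExact t ks

def aPref (t : String) : List String → Option String
  | [] => none
  | k :: ks => if PySem.Str.startswith t k then some k else aPref t ks

def aSuf (t : String) : List String → Option String
  | [] => none
  | k :: ks => if PySem.Str.endswith t k then some k else aSuf t ks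

def resolve_season_token_py (t_norm : Option String) (norm_keys : List String) : Option String :=
  match t_norm with
  | none => none
  | some t =>
    match aExact t norm_keys with
    | some k => some k
    | none =>
      match aPref t norm_keys with
      | some k => some k
      | none => aSuf t norm_keys

-- ===== PORT B =====
-- one pass: return on exact match, accumulate first prefix / first suffix candidates
def bLoop (t : String) : List String → Option String → Option String → Option String
  | [], p, s => match p with | some q => some q | none => s
  | k :: ks, p, s =>
    if t == k then some k
    else bLoop t ks
      (if p.isNone && PySem.Str.startswith t k then some k else p)
      (if s.isNone && PySem.Str.endswith t k then some k else s)

def resolve_season_token_py_alt (t_norm : Option String) (norm_keys : List String) : Option String :=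
  match t_norm with
  | none => none
  | some t => bLoop t norm_keys none none

-- ===== PRECONDITION & SPEC =====
def Spec_resolve_season_token_py (t_norm : Option String) (norm_keys : List String) (out : Option String) : Prop := out = resolve_season_token_py_alt t_norm norm_keys
instance (t_norm : Option String) (norm_keys : List String) (out : Option String) : Decidable (Spec_resolve_season_token_py t_norm norm_keys out) := by unfold Spec_resolve_season_token_py; infer_instance

-- ===== CLAIM (what is proved, stated in full; the proofs are below) =====
def Claim_equal_resolve_season_token_py : Prop := ∀ (t_norm : Option String) (norm_keys : List String), Dom_resolve_season_token_py t_norm norm_keys → Spec_resolve_season_token_py t_norm norm_keys (resolve_season_token_py t_norm norm_keys)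

-- ===== LEMMAS AND PROOFS =====
theorem bLoop_eq (t : String) (ks : List String) : ∀ (p s : Option String),
    bLoop t ks p s =
      match aExact t ks with
      | some k => some k
      | none =>
        match (match p with | some q => some q | none => aPref t ks) with
        | some k => some k
        | none => match s with | some q => some q | none => aSuf t ks := by
  induction ks with
  | nil => intro p s; cases p <;> cases s <;> simp [bLoop, aExact, aPref, aSuf]
  | cons k ks ih =>
    intro p s
    by_cases ht : t == k
    · simp [bLoop, aExact, ht]
    · simp only [bLoop, aExact, aPref, aSuf, ht, Bool.false_eq_true, ite_false]
      rw [ih]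
      cases p <;> cases s <;>
        by_cases hp : PySem.Chars.startswith t.toList k.toList = true <;>
        by_cases hs : PySem.Chars.endswith t.toList k.toList = true <;>
        simp [PySem.Str.startswith, PySem.Str.endswith, hp, hs]


-- ===== VERDICT (by name: the statement is the Claim_ definition above) =====
theorem resolve_season_token_py_spec : Claim_equal_resolve_season_token_py := by
  intro t_norm norm_keys _
  unfold Spec_resolve_season_token_py
  cases t_norm with
  | none => rfl
  | some t =>
    simp only [resolve_season_token_py, resolve_season_token_py_alt]
    rw [bLoop_eq]
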